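-- pv_equiv track=rewrite | github.com/shivamn05/y1_cs1010x | recitations/recitation_2/rec02/rec02.py | order_cost
-- ===== SOURCE A (Python) =====
-- PRICE_NORMAL = 2
--
-- PRICE_COMBO = 4
--
-- def is_biggie_size(meal):
--     if 4 < meal <= 8:
--         return True
--     return False
--
-- def combo_price(meal):
--     if is_biggie_size(meal):
--         return (meal-4) * PRICE_COMBO
--     else:
--         return (meal) * PRICE_NORMAL
--
-- def order_cost(order):
--     order = str(order)
--     if len(str(order)) == 0:
--         return 0
--     else:
--         first = combo_price(int(order[0]))
--         order = order[1:]
--         if len(order) == 0: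
--             return 0
--         return first + order_cost(int(order))
-- ===== SOURCE B (Python) =====
-- PRICE_NORMAL = 2
--
-- PRICE_COMBO = 4
--
-- def is_biggie_size(meal):
--     if 4 < meal <= 8:
--         return True
--     return False
--
-- def combo_price(meal):
--     if is_biggie_size(meal):
--         return (meal-4) * PRICE_COMBO
--     else:
--         return (meal) * PRICE_NORMAL
--
-- def order_cost(order):
--     total = 0
--     s = str(order)
--     while len(s) > 1:
--         total += combo_price(int(s[0]))
--         s = str(int(s[1:]))
--     return total
-- ===== Notes on version B (the rewrite author's own statement) =====
-- stated objective: idiomatic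
-- what changed: Replaces A's recursion (recomputing order_cost(int(order[1:])) on each call) by an explicit while-loop over the running string with a total accumulator; the str(int(...)) round-trip that drops leading zeros is kept.
import Mathlib
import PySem

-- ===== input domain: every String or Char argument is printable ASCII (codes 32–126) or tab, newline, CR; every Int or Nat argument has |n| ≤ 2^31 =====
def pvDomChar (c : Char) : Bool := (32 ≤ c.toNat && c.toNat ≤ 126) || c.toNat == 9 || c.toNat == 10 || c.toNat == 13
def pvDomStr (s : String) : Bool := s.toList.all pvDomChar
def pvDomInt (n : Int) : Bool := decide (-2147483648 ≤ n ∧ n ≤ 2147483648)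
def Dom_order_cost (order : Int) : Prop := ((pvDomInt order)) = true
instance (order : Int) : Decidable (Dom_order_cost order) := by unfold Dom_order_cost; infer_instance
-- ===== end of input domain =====

-- B replaces A's recursion by a plain while-loop over the running string with an accumulator (same values, iterative decomposition).

-- ===== PORT A =====
-- shared module helpers (identical in Source A and Source B)
def is_biggie_size (meal : Int) : Bool :=
  if 4 < meal ∧ meal ≤ 8 then true else false

def combo_price (meal : Int) : Int :=
  if is_biggie_size meal then (meal - 4) * 4 else meal * 2

-- A's recursion 'order_cost(int(order[1:]))'; fuel is only a totality guard
-- (the recursive argument strictly decreases on every input A accepts, so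
-- order.toNat + 1 steps always suffice).
def order_cost_go : Nat → Int → Int
  | 0, _ => 0
  | Nat.succ f, n =>
    let s := (PySem.Int.toStr n).toList
    if s.length = 0 then 0
    else
      match PySem.List.pyGet? s 0 with
      | none => 0  -- unreachable: s is nonempty here
      | some c =>
        let first := combo_price ((PySem.Int.ofChars? [c]).getD 0)  -- getD: int() raises only outside Pre_
        let rest := PySem.List.slice s (some 1) none
        if rest.length = 0 then 0
        else first + order_cost_go f ((PySem.Int.ofChars? rest).getD 0)

def order_cost (order : Int) : Int := order_cost_go (order.toNat + 1) order

-- ===== PORT B =====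
-- Source B's while-loop: state = (total, current string); fuel is only a totality guard
def order_cost_loop : Nat → Int → List Char → Int
  | 0, total, _ => total
  | Nat.succ f, total, s =>
    if 1 < s.length then
      match PySem.List.pyGet? s 0 with
      | none => total  -- unreachable: s has length > 1 here
      | some c =>
        order_cost_loop f (total + combo_price ((PySem.Int.ofChars? [c]).getD 0))
          (PySem.Int.toStr ((PySem.Int.ofChars? (PySem.List.slice s (some 1) none)).getD 0)).toList
    else total

def order_cost_alt (order : Int) : Int :=
  order_cost_loop (order.toNat + 1) 0 (PySem.Int.toStr order).toList

-- ===== PRECONDITION & SPEC =====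
-- Pre_ excludes exactly the negative orders: there str(order) starts with '-' and
-- Python's int('-') raises ValueError in both A and B.
def Pre_order_cost (order : Int) : Prop := 0 ≤ order
instance (order : Int) : Decidable (Pre_order_cost order) := by unfold Pre_order_cost; infer_instance

def pvWitness_order_cost : Int := (12)

def Spec_order_cost (order : Int) (out : Int) : Prop := out = order_cost_alt order
instance (order : Int) (out : Int) : Decidable (Spec_order_cost order out) := by unfold Spec_order_cost; infer_instance

-- ===== CLAIM (what is proved, stated in full; the proofs are below) =====
def Claim_equal_order_cost : Prop := ∀ (order : Int), Dom_order_cost order → Pre_order_cost order → Spec_order_cost order (order_cost order)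

-- ===== LEMMAS AND PROOFS =====

-- loop/recursion correspondence, fuel-generic: B's loop accumulates exactly A's recursion
theorem order_cost_loop_eq_go (f : Nat) :
    ∀ (n total : Int), order_cost_loop f total (PySem.Int.toStr n).toList = total + order_cost_go f n := by
  induction f with
  | zero => intro n total; simp [order_cost_loop, order_cost_go]
  | succ f ih =>
    intro n total
    simp only [order_cost_loop, order_cost_go]
    cases hs : (PySem.Int.toStr n).toList with
    | nil => simp
    | cons c t =>
      simp only [List.length_cons, PySem.List.slice_from_one, List.tail_cons]
      cases t with
      | nil => simp [PySem.List.pyGet?, PySem.List.pyIdx?]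
      | cons c' t' =>
        simp only [List.length_cons]
        rw [if_pos (by omega), if_neg (by simp)]
        have hget : PySem.List.pyGet? (c :: c' :: t') 0 = some c := by
          simp only [PySem.List.pyGet?, PySem.List.pyIdx?]
          split
          · split
            · simp
            · next h => exact absurd (show (0:Int) < ((c :: c' :: t').length : Int) by simp; positivity) h
          · omega
        rw [hget]
        simp only [Nat.succ_ne_zero, if_false, ih]
        ring

-- ===== VERDICT (by name: the statement is the Claim_ definition above) =====
theorem order_cost_spec : Claim_equal_order_cost := by
  intro order _ _
  unfold Spec_order_cost order_cost order_cost_alt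
  rw [order_cost_loop_eq_go]
  ring
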